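-- pv_equiv track=rewrite | github.com/Significant-Gravitas/AutoGPT | autogpt_platform/backend/backend/data/inmemory_queue.py | _match_topic
-- ===== SOURCE A (Python) =====
-- def _match_topic(routing_key: str, pattern: str) -> bool:
--     """Match a routing key against a topic pattern"""
--     routing_parts = routing_key.split('.')
--     pattern_parts = pattern.split('.')
--
--     if len(pattern_parts) > len(routing_parts) and '#' not in pattern:
--         return False
--
--     for i, pattern_part in enumerate(pattern_parts):
--         if pattern_part == '#':
--             # # matches zero or more words
--             return True
--         if pattern_part == '*':
--             # * matches exactly one word
--             if i >= len(routing_parts):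
--                 return False
--             continue
--         if i >= len(routing_parts) or routing_parts[i] != pattern_part:
--             return False
--
--     return len(routing_parts) == len(pattern_parts)
-- ===== SOURCE B (Python) =====
-- def _match_topic(routing_key: str, pattern: str) -> bool:
--     """Match a routing key against a topic pattern.
--
--     Two-pointer character scan over the raw strings: no part lists are
--     built; i/j point at the start of the current routing/pattern segment
--     (value len+1 means the segments are exhausted).
--     """
--     n, m = len(routing_key), len(pattern)
--     i = j = 0
--     while j <= m:
--         k = j
--         while k < m and pattern[k] != '.':
--             k += 1
--         if k == j + 1 and pattern[j] == '#':
--             return True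
--         if i > n:
--             return False
--         t = i
--         while t < n and routing_key[t] != '.':
--             t += 1
--         if not (k == j + 1 and pattern[j] == '*'):
--             if routing_key[i:t] != pattern[j:k]:
--                 return False
--         i = t + 1
--         j = k + 1
--     return i > n
-- ===== Notes on version B (the rewrite author's own statement) =====
-- stated objective: alternative
-- what changed: Replaced split-into-part-lists plus a loop over enumerated pattern parts by a two-pointer character-level scan over the raw strings: no lists are ever built, segment boundaries are found by advancing indices to the next '.', and '#'/'*' segments are recognised by their character span; A's redundant length pre-guard disappears.
import Mathlib
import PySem

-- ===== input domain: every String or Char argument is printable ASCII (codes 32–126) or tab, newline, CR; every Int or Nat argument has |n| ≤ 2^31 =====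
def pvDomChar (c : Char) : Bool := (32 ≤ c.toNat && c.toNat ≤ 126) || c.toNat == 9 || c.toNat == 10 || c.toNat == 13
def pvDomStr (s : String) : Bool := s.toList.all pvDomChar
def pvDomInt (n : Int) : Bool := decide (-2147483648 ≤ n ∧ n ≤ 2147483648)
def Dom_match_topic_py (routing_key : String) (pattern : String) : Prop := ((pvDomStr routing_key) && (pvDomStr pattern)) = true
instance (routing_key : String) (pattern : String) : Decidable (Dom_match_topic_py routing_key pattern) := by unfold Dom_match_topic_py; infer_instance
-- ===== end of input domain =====

-- B replaces A's split-into-part-lists + loop by a two-pointer character-level scan of the raw strings (no part lists built); objective: alternative, same results.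

-- ===== PORT A =====
-- s.split('.') (sep non-empty, so split? is always some)
def pvSplitDot (s : String) : List String := (PySem.Str.split? s ".").getD []

-- the for-loop of A: i is the enumerate index; 'some b' = early return b, 'none' = loop fell through
def matchLoopA (rp : List String) : Nat → List String → Option Bool
  | _, [] => none
  | i, p :: rest =>
    if p = "#" then some true
    else if p = "*" then
      if rp.length ≤ i then some false else matchLoopA rp (i + 1) rest
    else if rp.length ≤ i ∨ ¬ rp.getD i "" = p then some false
    else matchLoopA rp (i + 1) rest

def match_topic_py (routing_key : String) (pattern : String) : Bool :=
  let routing_parts := pvSplitDot routing_key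
  let pattern_parts := pvSplitDot pattern
  if pattern_parts.length > routing_parts.length ∧ ¬ PySem.Str.isIn "#" pattern = true then
    false
  else
    match matchLoopA routing_parts 0 pattern_parts with
    | some b => b
    | none => decide (routing_parts.length = pattern_parts.length)

-- ===== PORT B =====
-- the inner 'while k < len(s) and s[k] != '.': k += 1' of Source B (used for both strings)
def pvSeek (s : List Char) (k : Nat) : Nat :=
  if h : k < s.length then
    if s[k] = '.' then k else pvSeek s (k + 1)
  else k
termination_by s.length - k

-- k ≤ pvSeek s k (needed for pvScan's termination)
theorem pvSeek_le (s : List Char) (k : Nat) : k ≤ pvSeek s k := by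
  unfold pvSeek
  split
  · split
    · exact le_refl k
    · exact Nat.le_trans (Nat.le_succ k) (pvSeek_le s (k + 1))
  · exact le_refl k
termination_by s.length - k

-- the outer 'while j <= m' of Source B; s[a:b] for 0 ≤ a ≤ b is (s.drop a).take (b - a) (exact there)
def pvScan (rk pt : List Char) (i j : Nat) : Bool :=
  if _h : j ≤ pt.length then
    if pvSeek pt j = j + 1 ∧ pt.getD j ' ' = '#' then true
    else if rk.length < i then false
    else if ¬ (pvSeek pt j = j + 1 ∧ pt.getD j ' ' = '*') ∧
        ¬ (rk.drop i).take (pvSeek rk i - i) = (pt.drop j).take (pvSeek pt j - j) then false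
    else pvScan rk pt (pvSeek rk i + 1) (pvSeek pt j + 1)
  else decide (rk.length < i)
termination_by pt.length + 1 - j
decreasing_by
  have := pvSeek_le pt j
  omega

def match_topic_py_alt (routing_key : String) (pattern : String) : Bool :=
  pvScan routing_key.toList pattern.toList 0 0

-- ===== PRECONDITION & SPEC =====
def Spec_match_topic_py (routing_key : String) (pattern : String) (out : Bool) : Prop := out = match_topic_py_alt routing_key pattern
instance (routing_key : String) (pattern : String) (out : Bool) : Decidable (Spec_match_topic_py routing_key pattern out) := by unfold Spec_match_topic_py; infer_instance

-- ===== CLAIM (what is proved, stated in full; the proofs are below) =====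
def Claim_equal_match_topic_py : Prop := ∀ (routing_key : String) (pattern : String), Dom_match_topic_py routing_key pattern → Spec_match_topic_py routing_key pattern (match_topic_py routing_key pattern)

-- ===== LEMMAS AND PROOFS =====

def pvParts (cs : List Char) : List (List Char) :=
  let seg := cs.takeWhile (fun c => c ≠ '.')
  let rest := cs.dropWhile (fun c => c ≠ '.')
  if h : rest = [] then [seg] else seg :: pvParts rest.tail
termination_by cs.length
decreasing_by
  have h1 : (cs.dropWhile (fun c => c ≠ '.')).length ≤ cs.length :=
    (List.dropWhile_sublist _).length_le
  have h2 : 0 < (cs.dropWhile (fun c => c ≠ '.')).length := List.length_pos_iff.mpr h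
  simp only [List.length_tail]
  omega

lemma pvParts_eq (cs : List Char) : pvParts cs =
    (cs.takeWhile (fun c => c ≠ '.')) ::
      (if cs.dropWhile (fun c => c ≠ '.') = [] then []
       else pvParts (cs.dropWhile (fun c => c ≠ '.')).tail) := by
  rw [pvParts]; split <;> simp [*]

lemma pvParts_nil : pvParts [] = [[]] := by rw [pvParts_eq]; simp

lemma pvParts_dot (rest : List Char) : pvParts ('.' :: rest) = [] :: pvParts rest := by
  rw [pvParts_eq]
  simp

lemma pvParts_cons (c : Char) (rest : List Char) (hc : c ≠ '.') (hd : List Char)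
    (tl : List (List Char)) (hp : pvParts rest = hd :: tl) :
    pvParts (c :: rest) = (c :: hd) :: tl := by
  rw [pvParts_eq] at hp
  rw [pvParts_eq]
  simp only [List.takeWhile_cons, List.dropWhile_cons,
    if_pos (by simp [hc] : (decide (c ≠ '.')) = true), List.cons.injEq] at hp ⊢
  exact ⟨by simpa using hp.1, by simpa using hp.2⟩

lemma pvParts_ne_nil (cs : List Char) : pvParts cs ≠ [] := by
  rw [pvParts_eq]; simp

lemma go_parts : ∀ (fuel : Nat) (l cur : List Char) (acc : List (List Char)), l.length < fuel →
    PySem.Chars.splitOn.go ['.'] fuel l cur acc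
      = acc.reverse ++ (pvParts l).modifyHead (cur.reverse ++ ·) := by
  intro fuel
  induction fuel with
  | zero => intro l cur acc h; omega
  | succ fuel ih =>
    intro l cur acc h
    cases l with
    | nil =>
      rw [show PySem.Chars.splitOn.go ['.'] (fuel + 1) [] cur acc = (cur.reverse :: acc).reverse
          from by simp [PySem.Chars.splitOn.go]]
      simp [pvParts_nil]
    | cons c rest =>
      rw [show PySem.Chars.splitOn.go ['.'] (fuel + 1) (c :: rest) cur acc =
          (if ['.'].isPrefixOf (c :: rest) then
            PySem.Chars.splitOn.go ['.'] fuel (List.drop 1 (c :: rest)) [] (cur.reverse :: acc)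
          else PySem.Chars.splitOn.go ['.'] fuel rest (c :: cur) acc) from by
        simp [PySem.Chars.splitOn.go]]
      by_cases hc : c = '.'
      · subst hc
        rw [if_pos (by simp [List.isPrefixOf])]
        simp only [List.drop_succ_cons, List.drop_zero]
        rw [ih rest [] (cur.reverse :: acc)
          (by simp only [List.length_cons] at h; omega)]
        rcases hp : pvParts rest with _ | ⟨hd, tl⟩
        · exact absurd hp (pvParts_ne_nil rest)
        · rw [pvParts_dot, hp]
          simp only [List.modifyHead, List.reverse_cons, List.append_assoc, List.cons_append,
            List.nil_append, List.reverse_nil, List.append_nil]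
      · rw [if_neg (by simp [List.isPrefixOf]; exact fun h => hc h.symm)]
        rw [ih rest (c :: cur) acc (by simp only [List.length_cons] at h; omega)]
        rcases hp : pvParts rest with _ | ⟨hd, tl⟩
        · exact absurd hp (pvParts_ne_nil rest)
        · rw [pvParts_cons c rest hc hd tl hp]
          simp only [List.modifyHead, List.reverse_cons, List.append_assoc, List.cons_append,
            List.nil_append]

lemma parts_splitOn (cs : List Char) :
    PySem.Chars.splitOn cs ['.'] = pvParts cs := by
  rw [PySem.Chars.splitOn, go_parts (cs.length + 1) cs [] [] (by omega)]
  rcases hp : pvParts cs with _ | ⟨hd, tl⟩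
  · exact absurd hp (pvParts_ne_nil cs)
  · simp

lemma pvSplitDot_eq (s : String) :
    pvSplitDot s = (pvParts s.toList).map String.ofList := by
  simp [pvSplitDot, PySem.Str.split?, PySem.Chars.split?, parts_splitOn]

lemma mem_parts_subset (cs : List Char) (x : List Char) (hx : x ∈ pvParts cs) : x ⊆ cs := by
  rw [pvParts_eq] at hx
  rcases List.mem_cons.mp hx with rfl | hx
  · exact (List.takeWhile_sublist _).subset
  · split_ifs at hx with hrest
    · simp at hx
    · intro c hc
      have h1 : c ∈ (cs.dropWhile (fun c => c ≠ '.')).tail :=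
        mem_parts_subset _ x hx hc
      exact (List.dropWhile_sublist _).subset ((List.tail_sublist _).subset h1)
termination_by cs.length
decreasing_by
  have h1 : (cs.dropWhile (fun c => c ≠ '.')).length ≤ cs.length :=
    (List.dropWhile_sublist _).length_le
  have h2 : 0 < (cs.dropWhile (fun c => c ≠ '.')).length := List.length_pos_iff.mpr hrest
  simp only [List.length_tail]
  omega

lemma isIn_hash_of_mem_split (s : String) (h : "#" ∈ pvSplitDot s) :
    PySem.Str.isIn "#" s = true := by
  rw [pvSplitDot_eq] at h
  obtain ⟨x, hx, hox⟩ := List.mem_map.mp h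
  have hxe : x = ['#'] := by
    have := congrArg String.toList hox
    simpa using this
  have hmem : '#' ∈ s.toList := mem_parts_subset _ x hx (by simp [hxe])
  have : PySem.Chars.isIn "#".toList s.toList = true :=
    (PySem.Chars.isIn_iff_infix _ _).mpr (by
      simpa using (List.singleton_infix_iff '#' s.toList).mpr hmem)
  simpa [PySem.Str.isIn_eq] using this

def pvM : List String → List String → Bool
  | [], rs => rs.isEmpty
  | p :: pp, rs =>
    if p = "#" then true
    else match rs with
      | [] => false
      | r :: rt => (p == "*" || p == r) && pvM pp rt

lemma pvM_false_of_long (pp : List String) : ∀ (rs : List String), rs.length < pp.length →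
    "#" ∉ pp → pvM pp rs = false := by
  induction pp with
  | nil => intro rs h _; simp at h
  | cons p pt ih =>
    intro rs h hno
    have hp : ¬ p = "#" := fun he => hno (by simp [he])
    cases rs with
    | nil => simp [pvM, hp]
    | cons r rt =>
      simp only [pvM, if_neg hp]
      rw [ih rt (by simp at h ⊢; omega) (fun hm => hno (List.mem_cons_of_mem _ hm))]
      simp

lemma matchLoopA_eq_pvM (pp : List String) : ∀ (rp : List String) (i : Nat), i ≤ rp.length →
    (match matchLoopA rp i pp with
     | some b => b
     | none => decide (rp.length - i = pp.length)) = pvM pp (rp.drop i) := by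
  induction pp with
  | nil =>
    intro rp i hi
    have h2 : (rp.length - i = 0) ↔ (rp.length ≤ i) := by omega
    rw [show matchLoopA rp i [] = none from rfl]
    simp only [pvM]
    rw [show (List.drop i rp).isEmpty = decide (rp.length ≤ i) from by
      rw [Bool.eq_iff_iff]; simp [List.isEmpty_iff, List.drop_eq_nil_iff]]
    exact decide_eq_decide.mpr h2
  | cons p rest ih =>
    intro rp i hi
    by_cases hph : p = "#"
    · simp [matchLoopA, pvM, hph]
    · by_cases hend : rp.length ≤ i
      · have hieq : i = rp.length := le_antisymm hi hend
        have hd : rp.drop i = [] := by rw [hieq]; simp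
        by_cases hstar : p = "*"
        · simp [matchLoopA, pvM, hstar, hend, hd]
        · simp [matchLoopA, pvM, hph, hstar, hend, hd]
      · have hlt : i < rp.length := by omega
        have hd : rp.drop i = rp[i] :: rp.drop (i + 1) := List.drop_eq_getElem_cons hlt
        have hget : rp.getD i "" = rp[i] := List.getD_eq_getElem rp "" hlt
        by_cases hstar : p = "*"
        · subst hstar
          rw [show matchLoopA rp i ("*" :: rest) = matchLoopA rp (i + 1) rest by
            simp [matchLoopA, hph, hend]]
          rw [hd]
          have hmv : pvM ("*" :: rest) (rp[i] :: rp.drop (i + 1)) = pvM rest (rp.drop (i + 1)) := by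
            simp [pvM]
          rw [hmv, ← ih rp (i + 1) (by omega)]
          cases hres : matchLoopA rp (i + 1) rest with
          | some b => simp
          | none =>
            simp only [List.length_cons]
            exact decide_eq_decide.mpr (by omega)
        · have hcell : rp[i]?.getD "" = rp[i] := by simp [List.getElem?_eq_getElem hlt]
          by_cases heq : rp.getD i "" = p
          · have hri : rp[i] = p := by rw [← hget, heq]
            rw [show matchLoopA rp i (p :: rest) = matchLoopA rp (i + 1) rest by
              simp [matchLoopA, hph, hstar, hend, hcell, hri]]
            rw [hd]
            have hmv : pvM (p :: rest) (rp[i] :: rp.drop (i + 1)) = pvM rest (rp.drop (i + 1)) := by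
              simp [pvM, hph, hri]
            rw [hmv, ← ih rp (i + 1) (by omega)]
            cases hres : matchLoopA rp (i + 1) rest with
            | some b => simp
            | none =>
              simp only [List.length_cons]
              exact decide_eq_decide.mpr (by omega)
          · have hne : ¬ rp[i]?.getD "" = p := by
              rw [hcell]; exact fun h => heq (hget.trans h)
            rw [show matchLoopA rp i (p :: rest) = some false by
              simp [matchLoopA, hph, hstar, hne]]
            rw [hd]
            have h2 : ¬ p = rp[i] := fun h => heq (by rw [hget, ← h])
            simp [pvM, hph, hstar, h2]

lemma pvSeek_spec (s : List Char) (k : Nat) :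
    pvSeek s k = k + ((s.drop k).takeWhile (fun c => c ≠ '.')).length := by
  unfold pvSeek
  split
  · rename_i h
    have hd : s.drop k = s[k] :: s.drop (k + 1) := List.drop_eq_getElem_cons h
    split
    · rename_i he
      rw [hd, List.takeWhile_cons, if_neg (by simp [he])]
      simp
    · rename_i he
      rw [pvSeek_spec s (k + 1), hd, List.takeWhile_cons, if_pos (by simp [he])]
      simp
      omega
  · rename_i h
    rw [List.drop_of_length_le (by omega)]
    simp
termination_by s.length - k

-- the 'segment is exactly [c]' reading of Source B's  k == j+1 and s[j] == c
lemma pvSeek_singleton_iff (cs : List Char) (j : Nat) (c : Char) :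
    (pvSeek cs j = j + 1 ∧ cs.getD j ' ' = c) ↔
      (cs.drop j).takeWhile (fun x => x ≠ '.') = [c] := by
  rw [pvSeek_spec]
  rcases hd : cs.drop j with _ | ⟨c₀, tl⟩
  · simp
  · have hj : j < cs.length := by
      by_contra hc
      rw [List.drop_of_length_le (by omega)] at hd
      simp at hd
    have hget : cs.getD j ' ' = c₀ := by
      have h0 : (cs.drop j)[0]? = some c₀ := by rw [hd]; rfl
      rw [List.getElem?_drop] at h0
      simp only [Nat.add_zero] at h0
      simp [List.getD_eq_getElem?_getD, h0]
    rw [List.takeWhile_cons]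
    by_cases hc0 : c₀ = '.'
    · rw [if_neg (by simp [hc0])]
      constructor
      · rintro ⟨h1, _⟩; simp at h1
      · intro h; simp at h
    · rw [if_pos (by simp [hc0])]
      rw [hget]
      constructor
      · rintro ⟨h1, rfl⟩
        simp only [List.length_cons] at h1
        have : (tl.takeWhile (fun x => x ≠ '.')).length = 0 := by omega
        rw [List.length_eq_zero_iff] at this
        rw [this]
      · intro h
        have h1 := congrArg List.length h
        simp only [List.length_cons, List.length_nil] at h1
        have h2 : c₀ = c := by
          have := congrArg (·.headD ' ') h
          simpa using this
        have h3 : (tl.takeWhile (fun x => x ≠ '.')).length = 0 := by omega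
        refine ⟨?_, h2⟩
        simp only [List.length_cons]
        omega

lemma take_takeWhile (cs : List Char) (p : Char → Bool) :
    cs.take (cs.takeWhile p).length = cs.takeWhile p := by
  obtain ⟨t, ht⟩ := List.takeWhile_prefix (l := cs) (p := p)
  set w := cs.takeWhile p with hw
  rw [← ht]
  exact List.take_left

lemma drop_past_seg (cs : List Char) (j : Nat) :
    cs.drop (j + ((cs.drop j).takeWhile (fun c => c ≠ '.')).length + 1) =
      ((cs.drop j).dropWhile (fun c => c ≠ '.')).tail := by
  have h1 : cs.drop (j + ((cs.drop j).takeWhile (fun c => c ≠ '.')).length + 1) =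
      (cs.drop j).drop (((cs.drop j).takeWhile (fun c => c ≠ '.')).length + 1) := by
    rw [List.drop_drop]
    ring_nf
  have hLR := List.takeWhile_append_dropWhile (p := fun c => c ≠ '.') (l := cs.drop j)
  set L := (cs.drop j).takeWhile (fun c => c ≠ '.') with hL
  set R := (cs.drop j).dropWhile (fun c => c ≠ '.') with hR
  rw [h1, ← List.drop_drop, ← hLR, List.drop_left' rfl, List.drop_one]

lemma seg_end_iff (cs : List Char) (j : Nat) (hj : j ≤ cs.length) :
    j + ((cs.drop j).takeWhile (fun c => c ≠ '.')).length = cs.length ↔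
      (cs.drop j).dropWhile (fun c => c ≠ '.') = [] := by
  have h := congrArg List.length (List.takeWhile_append_dropWhile (p := fun c => c ≠ '.') (l := cs.drop j))
  simp only [List.length_append, List.length_drop] at h
  constructor
  · intro he
    rw [← List.length_eq_zero_iff]
    omega
  · intro he
    rw [he] at h
    simp only [List.length_nil] at h
    omega

lemma ofList_eq_iff (x y : List Char) : String.ofList x = String.ofList y ↔ x = y := by
  constructor
  · intro h
    have := congrArg String.toList h
    simpa using this
  · rintro rfl; rfl

lemma ofList_beq (x y : List Char) : (String.ofList x == String.ofList y) = (x == y) := by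
  by_cases h : x = y
  · subst h; simp
  · have h2 : ¬ String.ofList x = String.ofList y := fun hc => h ((ofList_eq_iff x y).mp hc)
    simp [h, h2]

lemma pvM_cons_hash (p : String) (pp rs : List String) (h : p = "#") :
    pvM (p :: pp) rs = true := by simp [pvM, h]

lemma pvM_cons_nil (p : String) (pp : List String) (h : ¬ p = "#") :
    pvM (p :: pp) [] = false := by simp [pvM, h]

lemma pvM_cons_cons (p r : String) (pp rt : List String) (h : ¬ p = "#") :
    pvM (p :: pp) (r :: rt) = ((p == "*" || p == r) && pvM pp rt) := by simp [pvM, h]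

lemma pvScan_eq_pvM (rk pt : List Char) (i j : Nat) :
    pvScan rk pt i j =
      pvM ((if j ≤ pt.length then pvParts (pt.drop j) else []).map String.ofList)
          ((if i ≤ rk.length then pvParts (rk.drop i) else []).map String.ofList) := by
  rw [pvScan]
  by_cases hj : j ≤ pt.length
  · rw [dif_pos hj, if_pos hj]
    have hk := pvSeek_spec pt j
    have hLplen : ((pt.drop j).takeWhile (fun c => c ≠ '.')).length ≤ pt.length - j := by
      have := (List.takeWhile_sublist (l := pt.drop j) (p := fun c => c ≠ '.')).length_le
      simpa using this
    rw [pvParts_eq (pt.drop j)]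
    by_cases hhash : (pt.drop j).takeWhile (fun c => c ≠ '.') = ['#']
    · rw [if_pos ((pvSeek_singleton_iff pt j '#').mpr hhash)]
      rw [List.map_cons, pvM_cons_hash _ _ _ (by rw [hhash])]
    · rw [if_neg (fun hc => hhash ((pvSeek_singleton_iff pt j '#').mp hc))]
      have hofhash : ¬ String.ofList ((pt.drop j).takeWhile (fun c => c ≠ '.')) = "#" :=
        fun hc => hhash ((ofList_eq_iff _ _).mp hc)
      by_cases hi : rk.length < i
      · rw [if_pos hi, if_neg (by omega : ¬ i ≤ rk.length)]
        rw [List.map_cons, List.map_nil, pvM_cons_nil _ _ hofhash]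
      · rw [if_neg hi, if_pos (by omega : i ≤ rk.length)]
        have ht := pvSeek_spec rk i
        rw [pvParts_eq (rk.drop i)]
        have hslice_p : (pt.drop j).take (pvSeek pt j - j) =
            (pt.drop j).takeWhile (fun c => c ≠ '.') := by
          rw [hk, show j + ((pt.drop j).takeWhile (fun c => c ≠ '.')).length - j =
            ((pt.drop j).takeWhile (fun c => c ≠ '.')).length from by omega]
          exact take_takeWhile _ _
        have hslice_r : (rk.drop i).take (pvSeek rk i - i) =
            (rk.drop i).takeWhile (fun c => c ≠ '.') := by
          rw [ht, show i + ((rk.drop i).takeWhile (fun c => c ≠ '.')).length - i =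
            ((rk.drop i).takeWhile (fun c => c ≠ '.')).length from by omega]
          exact take_takeWhile _ _
        by_cases hLs : ¬ (pt.drop j).takeWhile (fun c => c ≠ '.') = ['*'] ∧
            ¬ (rk.drop i).takeWhile (fun c => c ≠ '.') = (pt.drop j).takeWhile (fun c => c ≠ '.')
        · rw [if_pos (⟨fun hc => hLs.1 ((pvSeek_singleton_iff pt j '*').mp hc),
            fun hc => hLs.2 (by rw [hslice_r, hslice_p] at hc; exact hc)⟩ :
            (¬ (pvSeek pt j = j + 1 ∧ pt.getD j ' ' = '*') ∧
              ¬ (rk.drop i).take (pvSeek rk i - i) = (pt.drop j).take (pvSeek pt j - j)))]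
          have hb1 : (String.ofList ((pt.drop j).takeWhile (fun c => c ≠ '.')) == "*") = false := by
            rw [show ("*" : String) = String.ofList ['*'] from rfl, ofList_beq]
            exact beq_eq_false_iff_ne.mpr hLs.1
          have hb2 : (String.ofList ((pt.drop j).takeWhile (fun c => c ≠ '.')) ==
              String.ofList ((rk.drop i).takeWhile (fun c => c ≠ '.'))) = false := by
            rw [ofList_beq]
            exact beq_eq_false_iff_ne.mpr (fun hc => hLs.2 hc.symm)
          simp only [List.map_cons]
          rw [pvM_cons_cons _ _ _ _ hofhash, hb1, hb2]
          rfl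
        · rw [if_neg (fun hc => hLs
            ⟨fun e => hc.1 ((pvSeek_singleton_iff pt j '*').mpr e),
             fun e => hc.2 (by rw [hslice_r, hslice_p]; exact e)⟩)]
          rw [pvScan_eq_pvM rk pt (pvSeek rk i + 1) (pvSeek pt j + 1)]
          have hP : (if pvSeek pt j + 1 ≤ pt.length then pvParts (pt.drop (pvSeek pt j + 1)) else []) =
              (if (pt.drop j).dropWhile (fun c => c ≠ '.') = [] then []
               else pvParts ((pt.drop j).dropWhile (fun c => c ≠ '.')).tail) := by
            by_cases hend : (pt.drop j).dropWhile (fun c => c ≠ '.') = []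
            · rw [if_pos hend, if_neg]
              have := (seg_end_iff pt j hj).mpr hend
              omega
            · rw [if_neg hend, if_pos (by
                have h2 := (seg_end_iff pt j hj).not.mpr hend
                omega), hk, drop_past_seg]
          have hR : (if pvSeek rk i + 1 ≤ rk.length then pvParts (rk.drop (pvSeek rk i + 1)) else []) =
              (if (rk.drop i).dropWhile (fun c => c ≠ '.') = [] then []
               else pvParts ((rk.drop i).dropWhile (fun c => c ≠ '.')).tail) := by
            have hi' : i ≤ rk.length := by omega
            have hLrlen : ((rk.drop i).takeWhile (fun c => c ≠ '.')).length ≤ rk.length - i := by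
              have := (List.takeWhile_sublist (l := rk.drop i) (p := fun c => c ≠ '.')).length_le
              simpa using this
            by_cases hend : (rk.drop i).dropWhile (fun c => c ≠ '.') = []
            · rw [if_pos hend, if_neg]
              have := (seg_end_iff rk i hi').mpr hend
              omega
            · rw [if_neg hend, if_pos (by
                have h2 := (seg_end_iff rk i hi').not.mpr hend
                omega), ht, drop_past_seg]
          have hb : (String.ofList ((pt.drop j).takeWhile (fun c => c ≠ '.')) == "*" ||
              String.ofList ((pt.drop j).takeWhile (fun c => c ≠ '.')) ==
                String.ofList ((rk.drop i).takeWhile (fun c => c ≠ '.'))) = true := by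
            rcases Decidable.not_and_iff_not_or_not.mp hLs with h | h
            · have h' := not_not.mp h
              rw [show ("*" : String) = String.ofList ['*'] from rfl, ofList_beq, h']
              simp only [beq_self_eq_true, Bool.true_or]
            · have h' := not_not.mp h
              rw [ofList_beq, h']
              simp only [beq_self_eq_true, Bool.or_true]
          simp only [List.map_cons]
          rw [pvM_cons_cons _ _ _ _ hofhash, hb, Bool.true_and, hP, hR]
  · rw [dif_neg hj, if_neg hj]
    simp only [List.map_nil, pvM]
    by_cases hi : i ≤ rk.length
    · rw [if_pos hi]
      rcases hp : pvParts (rk.drop i) with _ | ⟨a, b⟩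
      · exact absurd hp (pvParts_ne_nil _)
      · simp only [List.map_cons, List.isEmpty_cons]
        simp
        omega
    · rw [if_neg hi]
      simp
      omega
termination_by pt.length + 1 - j
decreasing_by
  have := pvSeek_le pt j
  omega

-- ===== VERDICT (by name: the statement is the Claim_ definition above) =====
theorem match_topic_py_spec : Claim_equal_match_topic_py := by
  intro rk pat _
  unfold Spec_match_topic_py
  simp only [match_topic_py, match_topic_py_alt]
  rw [pvScan_eq_pvM rk.toList pat.toList 0 0]
  simp only [if_pos (Nat.zero_le _), List.drop_zero]
  rw [← pvSplitDot_eq pat, ← pvSplitDot_eq rk]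
  by_cases hg : (pvSplitDot pat).length > (pvSplitDot rk).length ∧
      ¬ PySem.Str.isIn "#" pat = true
  · rw [if_pos hg]
    have hno : "#" ∉ pvSplitDot pat := fun hm => hg.2 (isIn_hash_of_mem_split pat hm)
    exact (pvM_false_of_long (pvSplitDot pat) (pvSplitDot rk) hg.1 hno).symm
  · rw [if_neg hg]
    have h := matchLoopA_eq_pvM (pvSplitDot pat) (pvSplitDot rk) 0 (Nat.zero_le _)
    simp only [Nat.sub_zero, List.drop_zero] at h
    exact h
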